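-- pv_equiv track=rewrite | github.com/Quikks1lver/advent-of-code | 2020/day09.py | findOddball
-- ===== SOURCE A (Python) =====
-- from typing import List
--
-- def canTwoSum(numsList: List[int], target: int) -> bool:
--    """
--    If two numbers in the list can add to target, return True, else, False
--    """
--    for x in numsList:
--       targetNum = target - x
--       if targetNum in numsList:
--          return True
--    return False
--
-- def findOddball(numsList: List[int], preambleLength: int) -> int:
--    """
--    Finds the first number in the list which cannot be found by summing the
--    previous n numbers, where n is preambleLength
--    """
--    preambleList: List[int] = numsList[0:preambleLength]
--    listLength: int = len(numsList)
--    success: bool = False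
--
--    for i in range(preambleLength, listLength, 1):
--       if i != preambleLength:
--          preambleList.pop(0)
--          preambleList.append(numsList[i - 1])
--
--       possibleOddball: int = numsList[i]
--
--       if not canTwoSum(preambleList, possibleOddball):
--          return possibleOddball
-- ===== SOURCE B (Python) =====
-- from typing import List
--
-- def findOddball(numsList: List[int], preambleLength: int) -> int:
--    """
--    Same result as A, but checks each candidate with sort + two-pointer two-sum
--    on the window slice instead of A's repeated list-membership scans.
--    """
--    for i in range(preambleLength, len(numsList)):
--       window = sorted(numsList[i - preambleLength:i])
--       t = numsList[i]
--       lo, hi = 0, len(window) - 1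
--       found = False
--       while lo <= hi:
--          s = window[lo] + window[hi]
--          if s == t:
--             found = True
--             break
--          if s < t:
--             lo += 1
--          else:
--             hi -= 1
--       if not found:
--          return t
-- ===== Notes on version B (the rewrite author's own statement) =====
-- stated objective: alternative
-- what changed: Replaces A's incrementally maintained pop/append list window with repeated linear-membership two-sum scans by, per candidate, sorting the window slice and running the classic two-pointer two-sum scan on the sorted window.
-- outside the precondition, e.g. on findOddball([4, 3, -2, -3, -4, 2, -1], -1): A returns None, B returns 4
import Mathlib
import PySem

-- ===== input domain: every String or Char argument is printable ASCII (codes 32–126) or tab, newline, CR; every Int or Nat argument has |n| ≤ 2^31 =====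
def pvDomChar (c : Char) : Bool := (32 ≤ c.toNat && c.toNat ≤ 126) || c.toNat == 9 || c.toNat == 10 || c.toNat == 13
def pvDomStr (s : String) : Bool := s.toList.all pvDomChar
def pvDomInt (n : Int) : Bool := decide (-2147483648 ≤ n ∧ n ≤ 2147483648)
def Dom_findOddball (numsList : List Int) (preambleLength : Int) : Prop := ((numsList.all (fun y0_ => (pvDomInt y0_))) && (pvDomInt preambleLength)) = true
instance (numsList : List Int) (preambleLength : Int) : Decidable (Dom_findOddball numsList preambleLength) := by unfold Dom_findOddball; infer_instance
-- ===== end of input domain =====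

-- B checks each candidate by sorting the window slice and running a two-pointer two-sum
-- scan, instead of A's incrementally maintained list window with repeated membership scans
-- (objective: alternative algorithm for the inner check; same result).

-- ===== PORT A =====
def canTwoSum (numsList : List Int) (target : Int) : Bool :=
  numsList.any (fun x => numsList.contains (target - x))

-- the loop 'for i in range(preambleLength, listLength, 1)' with early return;
-- pop(0)/append ported as tail ++ [numsList[i-1]] — exact under Pre_ (the window is
-- nonempty and the indices are in range whenever the update line is reached)
def findOddballLoop (numsList : List Int) (preambleLength : Int)
    (idxs : List Int) (preambleList : List Int) : Option Int :=
  match idxs with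
  | [] => none
  | i :: rest =>
    let pre := if i = preambleLength then preambleList
               else preambleList.tail ++ [PySem.List.pyGetD numsList (i - 1) 0]
    let possibleOddball := PySem.List.pyGetD numsList i 0
    if !canTwoSum pre possibleOddball then some possibleOddball
    else findOddballLoop numsList preambleLength rest pre

def findOddball (numsList : List Int) (preambleLength : Int) : Option Int :=
  let preambleList := PySem.List.slice numsList (some 0) (some preambleLength)
  let listLength : Int := (numsList.length : Int)
  findOddballLoop numsList preambleLength (PySem.List.pyRange preambleLength listLength 1) preambleList

-- ===== PORT B =====
-- Source B's inner 'while lo <= hi' two-pointer loop, step for step (window[lo] in range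
-- whenever read under Pre_, ported with pyGetD)
def twoPtrLoop (w : List Int) (t : Int) (lo hi : Int) : Bool :=
  if h : lo ≤ hi then
    let s := PySem.List.pyGetD w lo 0 + PySem.List.pyGetD w hi 0
    if s = t then true
    else if s < t then twoPtrLoop w t (lo + 1) hi
    else twoPtrLoop w t lo (hi - 1)
  else false
termination_by (hi - lo + 1).toNat
decreasing_by all_goals omega

-- the outer 'for i in range(preambleLength, len(numsList))' with early return
def findOddballAltLoop (numsList : List Int) (preambleLength : Int)
    (idxs : List Int) : Option Int :=
  match idxs with
  | [] => none
  | i :: rest =>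
    let window := PySem.List.sorted
        (PySem.List.slice numsList (some (i - preambleLength)) (some i)) (fun x => x) false
    let t := PySem.List.pyGetD numsList i 0
    let found := twoPtrLoop window t 0 ((window.length : Int) - 1)
    if !found then some t else findOddballAltLoop numsList preambleLength rest

def findOddball_alt (numsList : List Int) (preambleLength : Int) : Option Int :=
  findOddballAltLoop numsList preambleLength
    (PySem.List.pyRange preambleLength (numsList.length : Int) 1)

-- ===== PRECONDITION & SPEC =====
-- Pre_ excludes negative preambleLength only: a window length is a count, outside the task's
-- natural domain; there A's behaviour is an accident of Python negative-slice/negative-index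
-- wraparound (on part of such inputs A raises IndexError), and B's own algorithm raises or
-- returns differently on part of them.
def Pre_findOddball (numsList : List Int) (preambleLength : Int) : Prop :=
  0 ≤ preambleLength
instance (numsList : List Int) (preambleLength : Int) : Decidable (Pre_findOddball numsList preambleLength) := by unfold Pre_findOddball; infer_instance

def pvWitness_findOddball : List Int × Int := ([35, 20, 15, 25, 47, 40, 62, 55, 65, 95, 102, 117, 150, 182, 127], 5)

def Spec_findOddball (numsList : List Int) (preambleLength : Int) (out : Option Int) : Prop := out = findOddball_alt numsList preambleLength
instance (numsList : List Int) (preambleLength : Int) (out : Option Int) : Decidable (Spec_findOddball numsList preambleLength out) := by unfold Spec_findOddball; infer_instance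

-- ===== CLAIM (what is proved, stated in full; the proofs are below) =====
def Claim_equal_findOddball : Prop := ∀ (numsList : List Int) (preambleLength : Int), Dom_findOddball numsList preambleLength → Pre_findOddball numsList preambleLength → Spec_findOddball numsList preambleLength (findOddball numsList preambleLength)

-- ===== LEMMAS AND PROOFS =====

-- the window numsList[j : j+P]
def pvW (nums : List Int) (P j : Nat) : List Int := (nums.drop j).take P

lemma pvW_cons (nums : List Int) (P j : Nat) (hP : 0 < P) (hj : j < nums.length) :
    pvW nums P j = nums[j] :: (nums.drop (j + 1)).take (P - 1) := by
  cases P with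
  | zero => omega
  | succ q =>
    unfold pvW
    rw [List.drop_eq_getElem_cons hj, List.take_succ_cons]
    simp

lemma pvW_step (nums : List Int) (P j : Nat) (hP : 0 < P) (h : j + P < nums.length) :
    (pvW nums P j).tail ++ [nums[j + P]] = pvW nums P (j + 1) := by
  rw [pvW_cons nums P j hP (by omega)]
  show (nums.drop (j+1)).take (P-1) ++ [nums[j + P]] = (nums.drop (j+1)).take P
  obtain ⟨q, rfl⟩ : ∃ q, P = q + 1 := ⟨P - 1, by omega⟩
  simp only [Nat.add_sub_cancel]
  rw [List.take_add_one]
  congr 1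
  rw [List.getElem?_drop]
  have hq : j + 1 + q = j + (q + 1) := by omega
  rw [hq, List.getElem?_eq_getElem h]
  simp

-- A's check, as an existential
lemma canTwoSum_iff (L : List Int) (t : Int) :
    canTwoSum L t = true ↔ ∃ x ∈ L, ∃ y ∈ L, x + y = t := by
  simp only [canTwoSum, List.any_eq_true, List.contains_eq_mem, decide_eq_true_eq]
  constructor
  · rintro ⟨x, hx, hmem⟩
    exact ⟨x, hx, t - x, hmem, by omega⟩
  · rintro ⟨x, hx, y, hy, hsum⟩
    refine ⟨x, hx, ?_⟩
    have hxy : t - x = y := by omega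
    rw [hxy]
    exact hy

-- two-pointer invariant on a list monotone in its indices
lemma twoPtr_iff (w : List Int)
    (hmono : ∀ p q : Nat, p ≤ q → q < w.length → w.getD p 0 ≤ w.getD q 0) (t : Int) :
    ∀ (n : Nat) (lo hi : Int), (hi - lo + 1).toNat ≤ n → 0 ≤ lo → hi < (w.length : Int) →
    (twoPtrLoop w t lo hi = true ↔
      ∃ i j : Nat, lo ≤ (i : Int) ∧ i ≤ j ∧ (j : Int) ≤ hi ∧ w.getD i 0 + w.getD j 0 = t) := by
  intro n
  induction n with
  | zero =>
    intro lo hi hn _ _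
    rw [twoPtrLoop, dif_neg (by omega)]
    simp only [Bool.false_eq_true, false_iff]
    rintro ⟨i, j, h1, h2, h3, _⟩
    omega
  | succ n ih =>
    intro lo hi hn hlo hhi
    by_cases hcmp : lo ≤ hi
    · obtain ⟨ln, rfl⟩ : ∃ ln : Nat, lo = (ln : Int) := ⟨lo.toNat, by omega⟩
      obtain ⟨hn', rfl⟩ : ∃ hn' : Nat, hi = (hn' : Int) := ⟨hi.toNat, by omega⟩
      have hhn : hn' < w.length := by exact_mod_cast hhi
      rw [twoPtrLoop, dif_pos hcmp]
      simp only [PySem.List.pyGetD_natCast]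
      by_cases h1 : w.getD ln 0 + w.getD hn' 0 = t
      · rw [if_pos h1]
        refine ⟨fun _ => ?_, fun _ => rfl⟩
        exact ⟨ln, hn', le_refl _, by exact_mod_cast hcmp, le_refl _, h1⟩
      · rw [if_neg h1]
        by_cases h2 : w.getD ln 0 + w.getD hn' 0 < t
        · rw [if_pos h2, ih ((ln : Int) + 1) (hn' : Int) (by omega) (by omega) hhi]
          constructor
          · rintro ⟨i, j, ha, hb, hc, hd⟩
            exact ⟨i, j, by omega, hb, hc, hd⟩
          · rintro ⟨i, j, ha, hb, hc, hd⟩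
            refine ⟨i, j, ?_, hb, hc, hd⟩
            by_contra hcon
            have hieq : i = ln := by omega
            subst hieq
            have hjle : j ≤ hn' := by exact_mod_cast hc
            have := hmono j hn' hjle hhn
            omega
        · rw [if_neg h2, ih (ln : Int) ((hn' : Int) - 1) (by omega) (by omega) (by omega)]
          constructor
          · rintro ⟨i, j, ha, hb, hc, hd⟩
            exact ⟨i, j, ha, hb, by omega, hd⟩
          · rintro ⟨i, j, ha, hb, hc, hd⟩
            refine ⟨i, j, ha, hb, ?_, hd⟩
            by_contra hcon
            have hjeq : j = hn' := by omega
            subst hjeq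
            have hile : ln ≤ i := by exact_mod_cast ha
            have := hmono ln i hile (by omega)
            omega
    · rw [twoPtrLoop, dif_neg hcmp]
      simp only [Bool.false_eq_true, false_iff]
      rintro ⟨i, j, ha, hb, hc, _⟩
      omega

-- B's whole inner check equals A's whole inner check
lemma twoPtr_eq_canTwoSum (L : List Int) (t : Int) :
    twoPtrLoop (PySem.List.sorted L (fun x => x) false) t 0
      (((PySem.List.sorted L (fun x => x) false).length : Int) - 1) = canTwoSum L t := by
  have hmono : ∀ p q : Nat, p ≤ q → q < (PySem.List.sorted L (fun x => x) false).length →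
      (PySem.List.sorted L (fun x => x) false).getD p 0 ≤ (PySem.List.sorted L (fun x => x) false).getD q 0 := by
    intro p q hpq hq
    rw [List.getD_eq_getElem _ 0 (by omega), List.getD_eq_getElem _ 0 hq]
    exact PySem.List.sorted_id_getElem_mono L hpq hq
  rw [Bool.eq_iff_iff, canTwoSum_iff,
    twoPtr_iff (PySem.List.sorted L (fun x => x) false) hmono t
      (PySem.List.sorted L (fun x => x) false).length 0
      (((PySem.List.sorted L (fun x => x) false).length : Int) - 1) (by omega) (by omega) (by omega)]
  constructor
  · rintro ⟨i, j, _, hij, hj, hsum⟩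
    have hjlen : j < (PySem.List.sorted L (fun x => x) false).length := by omega
    have hilen : i < (PySem.List.sorted L (fun x => x) false).length := by omega
    rw [List.getD_eq_getElem _ 0 hilen, List.getD_eq_getElem _ 0 hjlen] at hsum
    exact ⟨_, (PySem.List.mem_sorted L _ false _).mp (List.getElem_mem hilen),
           _, (PySem.List.mem_sorted L _ false _).mp (List.getElem_mem hjlen), hsum⟩
  · rintro ⟨x, hx, y, hy, hsum⟩
    rw [← PySem.List.mem_sorted L (fun x => x) false] at hx hy
    obtain ⟨i, hilen, rfl⟩ := List.getElem_of_mem hx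
    obtain ⟨j, hjlen, rfl⟩ := List.getElem_of_mem hy
    rcases le_total i j with hij | hij
    · exact ⟨i, j, by omega, hij, by omega,
        by rw [List.getD_eq_getElem _ 0 hilen, List.getD_eq_getElem _ 0 hjlen]; exact hsum⟩
    · exact ⟨j, i, by omega, hij, by omega,
        by rw [List.getD_eq_getElem _ 0 hjlen, List.getD_eq_getElem _ 0 hilen]; omega⟩


lemma pv_loop_agree (nums : List Int) (P : Nat) :
    ∀ (m j : Nat) (L : List Int),
      P + j + m = nums.length →
      ((j = 0 ∧ L = pvW nums P 0) ∨ (0 < j ∧ 0 < P ∧ L = pvW nums P (j - 1))) →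
      findOddballLoop nums (P : Int) (PySem.List.pyRange ((P : Int) + (j : Int)) (nums.length : Int) 1) L
        = findOddballAltLoop nums (P : Int) (PySem.List.pyRange ((P : Int) + (j : Int)) (nums.length : Int) 1) := by
  intro m
  induction m with
  | zero =>
    intro j L hlen _
    rw [PySem.List.pyRange_one_eq_nil (by omega)]
    rfl
  | succ m ih =>
    intro j L hlen hL
    have hin : P + j < nums.length := by omega
    rw [PySem.List.pyRange_one_cons (by omega)]
    simp only [findOddballLoop, findOddballAltLoop]
    -- the updated A-window is pvW nums P j
    have hL' : (if ((P : Int) + (j : Int)) = (P : Int) then L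
        else L.tail ++ [PySem.List.pyGetD nums ((P : Int) + (j : Int) - 1) 0]) = pvW nums P j := by
      rcases hL with ⟨hj0, rfl⟩ | ⟨hj0, hP, rfl⟩
      · subst hj0; simp
      · rw [if_neg (by omega)]
        have hidx : ((P : Int) + (j : Int) - 1) = ((j - 1 + P : Nat) : Int) := by omega
        rw [hidx, PySem.List.pyGetD_natCast, List.getD_eq_getElem _ _ (by omega)]
        have hstep := pvW_step nums P (j - 1) hP (by omega)
        have hj1 : j - 1 + 1 = j := by omega
        rw [hj1] at hstep
        exact hstep
    rw [hL']
    -- the B-side window slice is the same list, before sorting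
    have hslice : PySem.List.slice nums (some ((P : Int) + (j : Int) - (P : Int))) (some ((P : Int) + (j : Int)))
        = pvW nums P j := by
      have h1 : ((P : Int) + (j : Int) - (P : Int)) = ((j : Nat) : Int) := by omega
      have h2 : ((P : Int) + (j : Int)) = ((j + P : Nat) : Int) := by omega
      rw [h1, h2, PySem.List.slice_natCast]
      simp [pvW]
    rw [hslice, twoPtr_eq_canTwoSum]
    by_cases hc : canTwoSum (pvW nums P j) (PySem.List.pyGetD nums ((P : Int) + (j : Int)) 0) = true
    · rw [hc]
      simp only [Bool.not_true, Bool.false_eq_true, if_false]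
      have hP : 0 < P := by
        rcases Nat.eq_zero_or_pos P with h0 | h; swap; · exact h
        exfalso
        subst h0
        simp [pvW, canTwoSum] at hc
      have hnext : (P : Int) + (j : Int) + 1 = (P : Int) + ((j + 1 : Nat) : Int) := by omega
      rw [hnext]
      apply ih (j + 1)
      · omega
      · right
        exact ⟨by omega, hP, by simp⟩
    · rw [Bool.not_eq_true] at hc
      rw [hc]
      rfl

-- ===== VERDICT (by name: the statement is the Claim_ definition above) =====
theorem findOddball_spec : Claim_equal_findOddball := by
  intro nums p _hdom hpre
  unfold Spec_findOddball
  have hpre' : (0 : Int) ≤ p := hpre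
  obtain ⟨P, rfl⟩ : ∃ P : Nat, p = (P : Int) := ⟨p.toNat, (Int.toNat_of_nonneg hpre').symm⟩
  simp only [findOddball, findOddball_alt]
  rw [PySem.List.slice_zero_start, PySem.List.slice_to_natCast]
  by_cases hPn : P ≤ nums.length
  · have h := pv_loop_agree nums P (nums.length - P) 0 (List.take P nums)
      (by omega) (Or.inl ⟨rfl, by simp [pvW]⟩)
    simpa using h
  · rw [PySem.List.pyRange_one_eq_nil (by exact_mod_cast Nat.le_of_lt (by omega))]
    rfl
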